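-- pv_equiv track=rewrite | github.com/zouwensong/gitrsep | 第一次2.py | case_num
-- ===== SOURCE A (Python) =====
-- def case_num(ed_key_list):# 文件中有switch才能统计case
--     length = len(ed_key_list)
--     if ed_key_list.count('switch'):#从索引0位置查找switch个数且找到就执行
--         num_case = []
--         for i in range(length):
--             if ed_key_list[i] == 'switch':
--                 if (i + 1) == length or ed_key_list[i + 1] != 'case':  #switch是列表最后的元素或下一位置不是case
--                     num_case.append(0)
--                 elif i < length - 1:  #switch是列表中间元素
--                     flag = 1  #标记查找时步长
--                     if ed_key_list[i + flag] == 'case': #下一位置为case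
--                         case_cnt = 0  #标记case个数
--                         while i + flag < length: #在列表元素中查找，避免越界，系统报错
--                             if ed_key_list[flag + i] == 'case':
--                                 case_cnt += 1
--                                 flag += 1
--                             else:
--                                 break
--                         num_case.append(case_cnt)
--                     else:
--                         num_case.append(0)
--         return num_case
--     else:
--         return [0]
-- ===== SOURCE B (Python) =====
-- def case_num(ed_key_list):
--     if 'switch' not in ed_key_list:
--         return [0]
--     res = []
--     run = 0
--     for tok in reversed(ed_key_list):
--         if tok == 'switch':
--             res.append(run)
--         run = run + 1 if tok == 'case' else 0
--     res.reverse()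
--     return res
-- ===== Notes on version B (the rewrite author's own statement) =====
-- stated objective: alternative
-- what changed: Replaces the index loop with a nested while-scan after each 'switch' by a single right-to-left pass that maintains the length of the current run of 'case' tokens, so each element is visited once.
import Mathlib
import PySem

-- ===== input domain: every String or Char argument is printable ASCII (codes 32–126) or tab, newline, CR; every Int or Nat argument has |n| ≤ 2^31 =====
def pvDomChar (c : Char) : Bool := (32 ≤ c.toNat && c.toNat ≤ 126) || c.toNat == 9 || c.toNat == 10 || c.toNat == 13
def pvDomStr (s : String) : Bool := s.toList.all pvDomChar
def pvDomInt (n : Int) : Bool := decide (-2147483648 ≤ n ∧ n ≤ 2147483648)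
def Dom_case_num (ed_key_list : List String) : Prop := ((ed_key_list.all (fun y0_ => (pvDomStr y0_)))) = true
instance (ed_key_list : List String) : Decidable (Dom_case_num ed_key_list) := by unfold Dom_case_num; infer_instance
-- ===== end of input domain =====

-- B is a single right-to-left pass maintaining the length of the current run of 'case'
-- tokens, instead of A's index loop with a nested while-rescan after each 'switch'.

-- ===== PORT A =====
-- the inner 'while i + flag < length: …' loop of A
def caseWhile (xs : List String) (len i flag : Nat) (cnt : Int) : Int :=
  if _h : i + flag < len then
    if xs.getD (flag + i) "" = "case" then caseWhile xs len i (flag + 1) (cnt + 1)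
    else cnt
  else cnt
termination_by len - (i + flag)

-- the body of A's 'for i in range(length)' loop (accumulator = num_case)
def caseBody (xs : List String) (len : Nat) (acc : List Int) (i : Nat) : List Int :=
  if xs.getD i "" = "switch" then
    if i + 1 = len ∨ xs.getD (i + 1) "" ≠ "case" then acc ++ [0]
    else if i < len - 1 then
      if xs.getD (i + 1) "" = "case" then acc ++ [caseWhile xs len i 1 0]
      else acc ++ [0]
    else acc
  else acc

def case_num (ed_key_list : List String) : List Int :=
  let length := ed_key_list.length
  if PySem.List.count ed_key_list "switch" ≠ 0 then
    (List.range length).foldl (caseBody ed_key_list length) []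
  else [0]

-- ===== PORT B =====
-- state = (res, run); one step of B's loop over reversed(ed_key_list)
def altStep (st : List Int × Int) (tok : String) : List Int × Int :=
  (if tok = "switch" then st.1 ++ [st.2] else st.1,
   if tok = "case" then st.2 + 1 else 0)

def case_num_alt (ed_key_list : List String) : List Int :=
  if ¬ ed_key_list.contains "switch" then [0]
  else
    let st := ed_key_list.reverse.foldl altStep ([], 0)
    st.1.reverse

-- ===== PRECONDITION & SPEC =====
def Spec_case_num (ed_key_list : List String) (out : List Int) : Prop := out = case_num_alt ed_key_list
instance (ed_key_list : List String) (out : List Int) : Decidable (Spec_case_num ed_key_list out) := by unfold Spec_case_num; infer_instance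

-- ===== CLAIM (what is proved, stated in full; the proofs are below) =====
def Claim_equal_case_num : Prop := ∀ (ed_key_list : List String), Dom_case_num ed_key_list → Spec_case_num ed_key_list (case_num ed_key_list)

-- ===== LEMMAS AND PROOFS =====

-- reference semantics: number of leading "case" tokens
def runCase : List String → Int
  | [] => 0
  | t :: r => if t = "case" then 1 + runCase r else 0

-- reference semantics: for each "switch", the case count after it, in order
def caseSpec : List String → List Int
  | [] => []
  | t :: r => (if t = "switch" then [runCase r] else []) ++ caseSpec r

-- A's while loop counts the run of "case" starting at index i+flag
theorem caseWhile_eq (xs : List String) (i flag : Nat) (cnt : Int) :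
    caseWhile xs xs.length i flag cnt = cnt + runCase (xs.drop (i + flag)) := by
  generalize hm : xs.length - (i + flag) = m
  induction m generalizing flag cnt with
  | zero =>
      rw [caseWhile]
      have h1 : ¬ i + flag < xs.length := by omega
      have h2 : xs.drop (i + flag) = [] := List.drop_eq_nil_of_le (by omega)
      simp [h1, h2, runCase]
  | succ m ih =>
      rw [caseWhile]
      have hlt : i + flag < xs.length := by omega
      have hdrop : xs.drop (i + flag) = xs[i + flag] :: xs.drop (i + flag + 1) :=
        List.drop_eq_getElem_cons hlt
      have hgetD : xs.getD (flag + i) "" = xs[i + flag] := by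
        rw [Nat.add_comm flag i]; exact List.getD_eq_getElem xs "" hlt
      simp only [hlt, dite_true, hgetD, hdrop, runCase]
      split
      · rename_i hc
        rw [ih (flag + 1) (cnt + 1) (by omega)]
        have : i + (flag + 1) = i + flag + 1 := by omega
        rw [this]
        omega
      · rename_i hc
        simp [hc]

theorem caseBody_eq (xs : List String) (i : Nat) (hi : i < xs.length) (acc : List Int) :
    caseBody xs xs.length acc i =
      acc ++ (if xs[i] = "switch" then [runCase (xs.drop (i + 1))] else []) := by
  have hgi : xs.getD i "" = xs[i] := List.getD_eq_getElem xs "" hi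
  unfold caseBody
  rw [hgi]
  by_cases hs : xs[i] = "switch"
  · simp only [hs, if_pos rfl, if_pos rfl]
    by_cases hend : i + 1 = xs.length
    · have hdrop : xs.drop (i + 1) = [] := List.drop_eq_nil_of_le (by omega)
      simp [hend, hdrop, runCase]
    · have hlt : i + 1 < xs.length := by omega
      have hdrop : xs.drop (i + 1) = xs[i + 1] :: xs.drop (i + 2) :=
        List.drop_eq_getElem_cons hlt
      have hg1 : xs.getD (i + 1) "" = xs[i + 1] := List.getD_eq_getElem xs "" hlt
      by_cases hc : xs[i + 1] = "case"
      · have hmid : i < xs.length - 1 := by omega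
        have hw := caseWhile_eq xs i 1 0
        simp only [hend, hg1, hc, ne_eq, not_true_eq_false, or_false, if_false,
          hmid, if_pos rfl, if_true]
        rw [hw, zero_add]
      · have h0 : runCase (xs.drop (i + 1)) = 0 := by
          rw [hdrop, runCase]; simp [hc]
        have hcond : i + 1 = xs.length ∨ xs.getD (i + 1) "" ≠ "case" :=
          Or.inr (hg1 ▸ hc)
        rw [if_pos hcond, h0]
        simp
  · simp [hs]

-- flatMap over range(len) of the per-index contribution = caseSpec, by induction on xs
theorem flatMap_range_eq_caseSpec (xs : List String) :
    (List.range xs.length).flatMap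
      (fun i => if xs.getD i "" = "switch" then [runCase (xs.drop (i + 1))] else []) =
      caseSpec xs := by
  induction xs with
  | nil => simp [caseSpec]
  | cons t r ih =>
      rw [List.length_cons, List.range_succ_eq_map, List.flatMap_cons, List.flatMap_map]
      have h1 : ∀ a : Nat, (if (t :: r).getD a.succ "" = "switch"
            then [runCase ((t :: r).drop (a.succ + 1))] else []) =
          (if r.getD a "" = "switch" then [runCase (r.drop (a + 1))] else []) := by
        intro a
        simp [Nat.succ_eq_add_one, List.getD_cons_succ, List.drop_succ_cons]
      simp only [h1, ih, caseSpec]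
      simp

theorem foldl_range_eq_caseSpec (xs : List String) (acc : List Int) :
    (List.range xs.length).foldl (caseBody xs xs.length) acc = acc ++ caseSpec xs := by
  have h : (List.range xs.length).foldl (caseBody xs xs.length) acc =
      (List.range xs.length).foldl
        (fun acc i => acc ++ (if xs.getD i "" = "switch" then [runCase (xs.drop (i + 1))] else [])) acc := by
    apply PySem.List.foldl_congr_mem
    intro a i hi
    have hi' : i < xs.length := List.mem_range.mp hi
    rw [caseBody_eq xs i hi' a]
    rw [List.getD_eq_getElem xs "" hi']
  rw [h, PySem.List.foldl_append_eq_flatMap, flatMap_range_eq_caseSpec]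

-- B's fold over the reversed list computes (caseSpec xs).reverse and runCase xs
theorem altFold_eq (xs : List String) :
    xs.reverse.foldl altStep ([], 0) = ((caseSpec xs).reverse, runCase xs) := by
  induction xs with
  | nil => simp [caseSpec, runCase]
  | cons t r ih =>
      rw [List.reverse_cons, List.foldl_append, ih]
      simp only [List.foldl_cons, List.foldl_nil, altStep, caseSpec, runCase]
      by_cases hs : t = "switch"
      · by_cases hc : t = "case"
        · exact absurd (hc ▸ hs) (by decide)
        · simp [hs, hc]
      · by_cases hc : t = "case"
        · simp [hs, hc]
          omega
        · simp [hs, hc]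

theorem count_ne_iff (xs : List String) :
    PySem.List.count xs "switch" ≠ 0 ↔ "switch" ∈ xs := by
  simp [PySem.List.count_eq, Int.natCast_eq_zero, List.count_eq_zero]

-- ===== VERDICT (by name: the statement is the Claim_ definition above) =====
theorem case_num_spec : Claim_equal_case_num := by
  intro xs _
  unfold Spec_case_num
  simp only [case_num, case_num_alt]
  by_cases h : "switch" ∈ xs
  · rw [if_pos ((count_ne_iff xs).mpr h), if_neg (by simp [h]), foldl_range_eq_caseSpec,
      altFold_eq]
    simp
  · rw [if_neg (by simp [PySem.List.count_eq, List.count_eq_zero, h]), if_pos (by simp [h])]
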